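-- pv_equiv track=rewrite | github.com/Estefani-a/Crear_Matriz_Ingresar_cad_Python | Ejercicios Python/Ingresar cadena - E2.py | invertir_palabra
-- ===== SOURCE A (Python) =====
-- def invertir_palabra(palabra):
--     consonante_anterior = False
--     for letra in palabra:
--         if consonante_anterior==False:
--             if letra.lower() not in 'aeiouáéíóú':
--                 consonante_anterior=True
--                 continue
--         else:
--             if letra.lower() not in 'aeiouáéíóú':
--                 return palabra[::-1]
--             else:
--                 consonante_anterior=False
--
--     return palabra
-- ===== SOURCE B (Python) =====
-- def invertir_palabra(palabra):
--     vocales = 'aeiouáéíóú'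
--     for a, b in zip(palabra, palabra[1:]):
--         if a.lower() not in vocales and b.lower() not in vocales:
--             return palabra[::-1]
--     return palabra
-- ===== Notes on version B (the rewrite author's own statement) =====
-- stated objective: simpler
-- what changed: Replaced the boolean previous-was-consonant state machine (flag, continue, resets) by a stateless scan over adjacent character pairs via zip(palabra, palabra[1:]), reversing at the first all-consonant pair.
import Mathlib
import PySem

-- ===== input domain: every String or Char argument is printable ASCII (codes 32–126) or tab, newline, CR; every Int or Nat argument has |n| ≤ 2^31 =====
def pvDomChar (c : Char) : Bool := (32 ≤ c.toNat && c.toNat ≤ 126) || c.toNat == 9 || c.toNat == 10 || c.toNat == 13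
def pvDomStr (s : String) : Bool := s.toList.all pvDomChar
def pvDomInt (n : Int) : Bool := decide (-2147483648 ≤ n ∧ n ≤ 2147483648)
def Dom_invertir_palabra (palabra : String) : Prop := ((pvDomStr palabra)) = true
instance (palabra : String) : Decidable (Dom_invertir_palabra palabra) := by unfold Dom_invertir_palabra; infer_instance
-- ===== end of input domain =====

-- B replaces A's boolean previous-was-consonant state machine by a stateless scan of
-- adjacent character pairs (zip(palabra, palabra[1:])); same return value, same O(n) cost.

-- ===== PORT A =====
-- letra.lower() not in 'aeiouáéíóú'  (exact: Python's single-char 'in' on a string is char membership)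
def pvIsCons (c : Char) : Bool := !("aeiouáéíóú".toList.contains (PySem.Chars.lowerChar c))

-- A's for-loop over the characters, carrying the flag consonante_anterior;
-- palabra[::-1] = String.ofList palabra.toList.reverse (PySem.Str.slice?_none_none_neg_one)
def invertir_palabra_loop (palabra : String) : List Char → Bool → String
  | [], _ => palabra
  | letra :: rest, consonante_anterior =>
    if consonante_anterior = false then
      if pvIsCons letra then invertir_palabra_loop palabra rest true
      else invertir_palabra_loop palabra rest false
    else
      if pvIsCons letra then String.ofList palabra.toList.reverse
      else invertir_palabra_loop palabra rest false

def invertir_palabra (palabra : String) : String :=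
  invertir_palabra_loop palabra palabra.toList false

-- ===== PORT B =====
-- B's loop: for a, b in zip(palabra, palabra[1:]) — structural recursion on adjacent pairs
def invertir_palabra_alt_go (palabra : String) : List Char → String
  | a :: b :: rest =>
    if pvIsCons a && pvIsCons b then String.ofList palabra.toList.reverse
    else invertir_palabra_alt_go palabra (b :: rest)
  | _ => palabra

def invertir_palabra_alt (palabra : String) : String :=
  invertir_palabra_alt_go palabra palabra.toList

-- ===== PRECONDITION & SPEC =====
def Spec_invertir_palabra (palabra : String) (out : String) : Prop := out = invertir_palabra_alt palabra
instance (palabra : String) (out : String) : Decidable (Spec_invertir_palabra palabra out) := by unfold Spec_invertir_palabra; infer_instance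

-- ===== CLAIM (what is proved, stated in full; the proofs are below) =====
def Claim_equal_invertir_palabra : Prop := ∀ (palabra : String), Dom_invertir_palabra palabra → Spec_invertir_palabra palabra (invertir_palabra palabra)

-- ===== LEMMAS AND PROOFS =====
theorem invertir_loop_eq_go (p : String) (l : List Char) :
    invertir_palabra_loop p l false = invertir_palabra_alt_go p l ∧
    (∀ c : Char, pvIsCons c = true →
      invertir_palabra_loop p l true = invertir_palabra_alt_go p (c :: l)) := by
  induction l with
  | nil =>
    constructor
    · rfl
    · intro c hc
      simp [invertir_palabra_loop, invertir_palabra_alt_go]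
  | cons d r ih =>
    cases r with
    | nil =>
      constructor
      · cases hd : pvIsCons d <;>
          simp [invertir_palabra_loop, invertir_palabra_alt_go, hd]
      · intro c hc
        cases hd : pvIsCons d <;>
          simp [invertir_palabra_loop, invertir_palabra_alt_go, hd, hc]
    | cons e r' =>
      have hloopF : invertir_palabra_loop p (d :: e :: r') false
          = (if pvIsCons d then invertir_palabra_loop p (e :: r') true
             else invertir_palabra_loop p (e :: r') false) := by
        simp [invertir_palabra_loop]
      have hloopT : invertir_palabra_loop p (d :: e :: r') true
          = (if pvIsCons d then String.ofList p.toList.reverse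
             else invertir_palabra_loop p (e :: r') false) := by
        simp [invertir_palabra_loop]
      constructor
      · rw [hloopF]
        cases hd : pvIsCons d
        · rw [if_neg (by simp), ih.1, invertir_palabra_alt_go]
          simp [hd]
        · rw [if_pos rfl, ih.2 d hd]
      · intro c hc
        rw [hloopT]
        cases hd : pvIsCons d
        · rw [if_neg (by simp)]
          have hgo : invertir_palabra_alt_go p (c :: d :: e :: r')
              = invertir_palabra_alt_go p (d :: e :: r') := by
            rw [invertir_palabra_alt_go]; simp [hd]
          have hgo2 : invertir_palabra_alt_go p (d :: e :: r')
              = invertir_palabra_alt_go p (e :: r') := by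
            rw [invertir_palabra_alt_go]; simp [hd]
          rw [hgo, hgo2]; exact ih.1
        · rw [if_pos rfl]
          rw [invertir_palabra_alt_go]
          simp [hc, hd]

-- ===== VERDICT (by name: the statement is the Claim_ definition above) =====
theorem invertir_palabra_spec : Claim_equal_invertir_palabra := by
  intro palabra _
  unfold Spec_invertir_palabra invertir_palabra invertir_palabra_alt
  exact (invertir_loop_eq_go palabra palabra.toList).1
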